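-- pv_equiv track=rewrite | github.com/lidiaabad/MiniGAN | demoaudio/models.py | valid_length
-- ===== SOURCE A (Python) =====
-- import math
--
-- def valid_length(length):
--     """
--     Return the nearest valid length to use with the model
--     """
--     # Encoder
--     k, s, p = 7, 1, 3
--     length = math.ceil(((length + 2*p -k) / s) + 1)
--     k, s, p = 4, 2, 1
--     for idx in range(5):
--         length = math.ceil(((length + 2*p -k) / s) + 1)
--         length = max(length, 1)
--
--     # Resnet
--     k, s, p = 3, 1, 1
--     for idx in range(6):
--         length = math.ceil(((length + 2*p -k) / s) + 1)
--         length = max(length, 1)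
--
--     # Decoder
--     k, s, p = 4, 2, 1
--     for idx in range(5):
--         length = math.ceil((length - 1)*s - 2*p + k)
--     k, s, p = 7, 1, 3
--     length = math.ceil((length - 1)*s - 2*p + k)
--     return int(length)
-- ===== SOURCE B (Python) =====
-- def valid_length(length):
--     """
--     Return the nearest valid length to use with the model
--     """
--     # Closed form: the encoder's five stride-2 layers compute
--     # length -> max(ceil(length/2), 1), all other layers are identities
--     # (resnet) or doublings (decoder), so the result is
--     # 32 * max(ceil(length/32), 1).
--     return 32 * max(-(-length // 32), 1)
-- ===== Notes on version B (the rewrite author's own statement) =====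
-- stated objective: simpler
-- what changed: Replaced the layer-by-layer simulation (16 loop iterations of ceil arithmetic) with the closed form 32 * max(ceil(length/32), 1): the five stride-2 encoder layers halve (with ceiling, clamped at 1), the resnet layers are identities, and the five decoder layers double.
import Mathlib
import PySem

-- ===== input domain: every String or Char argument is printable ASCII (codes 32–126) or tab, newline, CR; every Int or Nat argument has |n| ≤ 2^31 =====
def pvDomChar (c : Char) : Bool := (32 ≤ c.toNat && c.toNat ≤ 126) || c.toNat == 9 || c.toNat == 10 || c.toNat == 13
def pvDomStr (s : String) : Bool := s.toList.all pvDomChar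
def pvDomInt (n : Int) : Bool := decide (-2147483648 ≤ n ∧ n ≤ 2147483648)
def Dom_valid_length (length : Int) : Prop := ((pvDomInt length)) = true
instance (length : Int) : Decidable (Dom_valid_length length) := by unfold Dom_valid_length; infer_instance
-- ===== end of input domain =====

-- B replaces A's 16-iteration layer-by-layer length simulation by the closed form
-- 32 * max(ceil(length/32), 1) (objective: simpler).

-- ===== PORT A =====
-- math.ceil(x / b) for integer x and b > 0, exact: Python computes it on floats,
-- which are exact here (|values| ≤ 2^36, divisors are powers of 2).
def pvCeilDiv (a b : Int) : Int := -((-a) / b)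

-- one encoder-loop body: length = ceil((length + 2*p - k)/s + 1); length = max(length, 1)
-- with k,s,p = 4,2,1; math.ceil(x/2 + 1) = pvCeilDiv (x + 2) 2 exactly.
def pvEncStep (l : Int) : Int := max (pvCeilDiv (l + 2*1 - 4 + 2) 2) 1

-- one resnet-loop body, k,s,p = 3,1,1: ceil(x/1 + 1) = x + 1.
def pvResStep (l : Int) : Int := max (l + 2*1 - 3 + 1) 1

-- one decoder-loop body, k,s,p = 4,2,1: math.ceil of an integer is itself.
def pvDecStep (l : Int) : Int := (l - 1) * 2 - 2*1 + 4

def valid_length (length : Int) : Int :=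
  -- first encoder layer, k,s,p = 7,1,3: ceil(x/1 + 1) = x + 1
  let l0 := length + 2*3 - 7 + 1
  let l1 := (PySem.List.pyRange 0 5 1).foldl (fun l _ => pvEncStep l) l0
  let l2 := (PySem.List.pyRange 0 6 1).foldl (fun l _ => pvResStep l) l1
  let l3 := (PySem.List.pyRange 0 5 1).foldl (fun l _ => pvDecStep l) l2
  -- last decoder layer, k,s,p = 7,1,3
  (l3 - 1) * 1 - 2*3 + 7

-- ===== PORT B =====
def valid_length_alt (length : Int) : Int :=
  32 * max (-(PySem.Int.floordiv (-length) 32)) 1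

-- ===== PRECONDITION & SPEC =====
def Spec_valid_length (length : Int) (out : Int) : Prop := out = valid_length_alt length
instance (length : Int) (out : Int) : Decidable (Spec_valid_length length out) := by unfold Spec_valid_length; infer_instance

-- ===== CLAIM (what is proved, stated in full; the proofs are below) =====
def Claim_equal_valid_length : Prop := ∀ (length : Int), Dom_valid_length length → Spec_valid_length length (valid_length length)

-- ===== LEMMAS AND PROOFS =====

theorem pvEnc1 (l : Int) : pvEncStep l = max (-((-l) / 2)) 1 := by
  have h : l + 2*1 - 4 + 2 = l := by ring
  simp only [pvEncStep, pvCeilDiv, h]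

theorem pvEnc2 (l : Int) :
    pvEncStep (max (-((-l) / 2)) 1) = max (-((-l) / 4)) 1 := by
  simp only [pvEncStep, pvCeilDiv, max_def]
  split_ifs <;> omega

theorem pvEnc3 (l : Int) :
    pvEncStep (max (-((-l) / 4)) 1) = max (-((-l) / 8)) 1 := by
  simp only [pvEncStep, pvCeilDiv, max_def]
  split_ifs <;> omega

theorem pvEnc4 (l : Int) :
    pvEncStep (max (-((-l) / 8)) 1) = max (-((-l) / 16)) 1 := by
  simp only [pvEncStep, pvCeilDiv, max_def]
  split_ifs <;> omega

theorem pvEnc5 (l : Int) :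
    pvEncStep (max (-((-l) / 16)) 1) = max (-((-l) / 32)) 1 := by
  simp only [pvEncStep, pvCeilDiv, max_def]
  split_ifs <;> omega

theorem pvRes (l : Int) (h : 1 ≤ l) : pvResStep l = l := by
  simp only [pvResStep]; omega

theorem pvEnc5all (l : Int) :
    pvEncStep (pvEncStep (pvEncStep (pvEncStep (pvEncStep l)))) = max (-((-l) / 32)) 1 := by
  rw [pvEnc1 l, pvEnc2, pvEnc3, pvEnc4, pvEnc5]

theorem valid_length_spec : Claim_equal_valid_length := by
  unfold Claim_equal_valid_length
  intro length _
  unfold Spec_valid_length valid_length valid_length_alt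
  have hr5 : PySem.List.pyRange 0 5 1 = [0, 1, 2, 3, 4] := by decide
  have hr6 : PySem.List.pyRange 0 6 1 = [0, 1, 2, 3, 4, 5] := by decide
  rw [hr5, hr6]
  simp only [List.foldl]
  have h0 : length + 2*3 - 7 + 1 = length := by ring
  rw [h0, pvEnc5all]
  set e := max (-((-length) / 32)) 1 with he
  have h1 : (1 : Int) ≤ e := le_max_right _ _
  rw [pvRes e h1, pvRes e h1, pvRes e h1, pvRes e h1, pvRes e h1, pvRes e h1]
  rw [PySem.Int.floordiv_eq_ediv_of_pos (by norm_num)]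
  simp only [pvDecStep]
  ring
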